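-- pv_equiv track=rewrite | github.com/Laurence-Cullen/Dulcimer-Tab-Converter | tab_converter.py | notes_to_dulcimer_tab
-- ===== SOURCE A (Python) =====
-- note_to_dulcimer_string = {
--     "E": "[1]",
--     "G": "[2]",
--     "A": "[3]",
--     "B": "[4]",
--     "C": "[5]",
--     "C#": "1",
--     "D": "[6]/2",
--     "D#": "3",
--     "e": "[7]",
--     "f": "[8]",
--     "f#": "4",
--     "g": "5",
--     "g#": "[9]/(1)",
--     "a": "[10]/6/(2)",
--     "a#": "[11]/(3)",
--     "b": "[12]/7",
--     "c": "8",
--     "c#": "(4)",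
--     "d": "9/(5)",
--     "d#": "10",
--     "e'": "(6)",
--     "f'": "11",
--     "f#'": "(7)",
--     "g'": "(8)",
--     "g#'": "12",
--     "a'": "(9)",
--     "a#'": "(10)",
--     "c'": "(11)",
--     "d#'": "(12)",
-- }
--
-- def get_unit_width():
--     unit_width = 0
--     for note in note_to_dulcimer_string:
--         if len(note_to_dulcimer_string[note]) > unit_width:
--             unit_width = len(note_to_dulcimer_string[note])
--
--     return unit_width
--
-- def validate_fill_char(fill_char: str):
--     if len(fill_char) != 1:
--         raise ValueError(f"fill char must be a string of length 1, got length: {len(fill_char)}")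
--
-- def note_to_dulc_tab_string(note: str, unit_width: int, fill_char: str = '-'):
--     validate_fill_char(fill_char)
--     fill_value = note_to_dulcimer_string.get(note, note)
--     return fill_value + fill_char * (unit_width - len(fill_value))
--
-- def notes_to_dulcimer_tab(notes, last_beat: int, bar_lines=None):
--     if bar_lines is None:
--         bar_lines = {}
--
--     dulcimer_tab = ''
--
--     unit_width = get_unit_width()
--
--     for beat in range(0, last_beat + 1):
--         if beat in notes:
--             dulcimer_tab += note_to_dulc_tab_string(notes[beat], unit_width)
--         elif beat in bar_lines:
--             dulcimer_tab = dulcimer_tab + '|' * unit_width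
--         else:
--             dulcimer_tab = dulcimer_tab + '-' * unit_width
--
--     return dulcimer_tab
-- ===== SOURCE B (Python) =====
-- note_to_dulcimer_string = {
--     "E": "[1]", "G": "[2]", "A": "[3]", "B": "[4]", "C": "[5]", "C#": "1",
--     "D": "[6]/2", "D#": "3", "e": "[7]", "f": "[8]", "f#": "4", "g": "5",
--     "g#": "[9]/(1)", "a": "[10]/6/(2)", "a#": "[11]/(3)", "b": "[12]/7",
--     "c": "8", "c#": "(4)", "d": "9/(5)", "d#": "10", "e'": "(6)", "f'": "11",
--     "f#'": "(7)", "g'": "(8)", "g#'": "12", "a'": "(9)", "a#'": "(10)",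
--     "c'": "(11)", "d#'": "(12)",
-- }
--
--
-- def note_to_dulc_tab_string(note, unit_width, fill_char='-'):
--     fill_value = note_to_dulcimer_string.get(note, note)
--     return fill_value + fill_char * (unit_width - len(fill_value))
--
--
-- def notes_to_dulcimer_tab(notes, last_beat: int, bar_lines=None):
--     unit_width = max(len(v) for v in note_to_dulcimer_string.values())
--     segments = ['-' * unit_width] * (last_beat + 1)
--     for key in (bar_lines or {}):
--         if 0 <= key <= last_beat:
--             segments[key] = '|' * unit_width
--     for key, value in notes.items():
--         if 0 <= key <= last_beat:
--             segments[key] = note_to_dulc_tab_string(value, unit_width)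
--     return ''.join(segments)
-- ===== Notes on version B (the rewrite author's own statement) =====
-- stated objective: alternative
-- what changed: Replaces A's per-beat three-way membership branch (note / bar line / rest, appended to a growing string) with a prefilled segment table of default rests written by two scatter passes over bar_lines and notes (notes last, so notes win on collisions), then a single join; Pre_ requires the keys of notes to be distinct, which every Python dict satisfies (on an association list with a duplicated key, A's first-match lookup and B's last-write order would pick different bindings).
import Mathlib
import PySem

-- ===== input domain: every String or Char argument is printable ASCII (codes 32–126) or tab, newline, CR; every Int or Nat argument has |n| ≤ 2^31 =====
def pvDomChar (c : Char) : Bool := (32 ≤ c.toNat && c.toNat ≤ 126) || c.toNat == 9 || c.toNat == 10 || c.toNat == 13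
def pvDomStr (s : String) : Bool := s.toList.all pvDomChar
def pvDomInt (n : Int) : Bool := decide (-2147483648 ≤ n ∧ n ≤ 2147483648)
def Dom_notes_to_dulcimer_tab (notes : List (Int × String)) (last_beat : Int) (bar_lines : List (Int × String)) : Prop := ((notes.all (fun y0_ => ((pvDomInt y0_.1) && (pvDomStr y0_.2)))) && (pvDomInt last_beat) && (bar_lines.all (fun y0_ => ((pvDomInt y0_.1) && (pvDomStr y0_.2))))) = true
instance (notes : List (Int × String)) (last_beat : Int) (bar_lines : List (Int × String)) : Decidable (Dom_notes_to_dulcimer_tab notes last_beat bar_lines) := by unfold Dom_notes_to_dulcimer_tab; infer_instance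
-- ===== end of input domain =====

-- B replaces A's per-beat three-way membership branch by a prefilled segment table written by two
-- scatter passes over bar_lines and notes (alternative decomposition, same asymptotic cost).

-- ===== PORT A =====
-- the module-level dict note_to_dulcimer_string as an association list (insertion order)
def pvNoteTable : List (String × String) :=
  [("E", "[1]"), ("G", "[2]"), ("A", "[3]"), ("B", "[4]"), ("C", "[5]"), ("C#", "1"),
   ("D", "[6]/2"), ("D#", "3"), ("e", "[7]"), ("f", "[8]"), ("f#", "4"), ("g", "5"),
   ("g#", "[9]/(1)"), ("a", "[10]/6/(2)"), ("a#", "[11]/(3)"), ("b", "[12]/7"),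
   ("c", "8"), ("c#", "(4)"), ("d", "9/(5)"), ("d#", "10"), ("e'", "(6)"), ("f'", "11"),
   ("f#'", "(7)"), ("g'", "(8)"), ("g#'", "12"), ("a'", "(9)"), ("a#'", "(10)"),
   ("c'", "(11)"), ("d#'", "(12)")]

-- first-match association-list lookup (= Python dict lookup under the task's dict convention); exact
def pvLookup {κ : Type} [BEq κ] (l : List (κ × String)) (k : κ) : Option String :=
  (l.find? (fun kv => kv.1 == k)).map (·.2)

-- c * n for a single character c (Python 'fill_char * n': n copies, empty for n ≤ 0); exact
def pvCharMul (c : Char) (n : Int) : String := String.ofList (List.replicate n.toNat c)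

-- get_unit_width(): loop over the dict's keys, looking each value up (key always present, getD "" unreachable)
def pvGetUnitWidth : Int :=
  (pvNoteTable.map (·.1)).foldl (fun uw note =>
    if PySem.Str.len ((pvLookup pvNoteTable note).getD "") > uw
    then PySem.Str.len ((pvLookup pvNoteTable note).getD "") else uw) 0

-- note_to_dulc_tab_string(note, unit_width) with the default fill_char '-' (validate_fill_char passes)
def pvNoteToDulcTabString (note : String) (unit_width : Int) : String :=
  let fill_value := (pvLookup pvNoteTable note).getD note
  fill_value ++ pvCharMul '-' (unit_width - PySem.Str.len fill_value)

def notes_to_dulcimer_tab (notes : List (Int × String)) (last_beat : Int) (bar_lines : List (Int × String)) : String :=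
  let unit_width := pvGetUnitWidth
  (PySem.List.pyRange 0 (last_beat + 1) 1).foldl (fun tab beat =>
    match pvLookup notes beat with
    | some v => tab ++ pvNoteToDulcTabString v unit_width
    | none =>
      if (pvLookup bar_lines beat).isSome then tab ++ pvCharMul '|' unit_width
      else tab ++ pvCharMul '-' unit_width) ""

-- ===== PORT B =====
-- max(len(v) for v in note_to_dulcimer_string.values()) (table literal is nonempty, getD 0 unreachable)
def pvUnitWidthB : Int :=
  (PySem.List.max? (pvNoteTable.map (fun kv => PySem.Str.len kv.2)) (fun x => x)).getD 0

def notes_to_dulcimer_tab_alt (notes : List (Int × String)) (last_beat : Int) (bar_lines : List (Int × String)) : String :=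
  let unit_width := pvUnitWidthB
  let segments : List String := List.replicate (last_beat + 1).toNat (pvCharMul '-' unit_width)
  let segments := bar_lines.foldl (fun segs kv =>
    if 0 ≤ kv.1 ∧ kv.1 ≤ last_beat then segs.set kv.1.toNat (pvCharMul '|' unit_width) else segs) segments
  let segments := notes.foldl (fun segs kv =>
    if 0 ≤ kv.1 ∧ kv.1 ≤ last_beat then segs.set kv.1.toNat (pvNoteToDulcTabString kv.2 unit_width) else segs) segments
  PySem.Str.join "" segments

-- ===== PRECONDITION & SPEC =====
-- Pre_ requires the keys of notes to be distinct, which every Python dict satisfies by construction;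
-- on an association list with a duplicated key — not representable as a dict — A's first-match lookup
-- and B's last-write scatter would pick different bindings, so those lists are excluded.
def Pre_notes_to_dulcimer_tab (notes : List (Int × String)) (last_beat : Int) (bar_lines : List (Int × String)) : Prop :=
  (notes.map Prod.fst).Nodup
instance (notes : List (Int × String)) (last_beat : Int) (bar_lines : List (Int × String)) : Decidable (Pre_notes_to_dulcimer_tab notes last_beat bar_lines) := by unfold Pre_notes_to_dulcimer_tab; infer_instance

def pvWitness_notes_to_dulcimer_tab : (List (Int × String)) × Int × (List (Int × String)) :=
  ([(0, "E"), (2, "g")], 3, [(1, "")])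

def Spec_notes_to_dulcimer_tab (notes : List (Int × String)) (last_beat : Int) (bar_lines : List (Int × String)) (out : String) : Prop := out = notes_to_dulcimer_tab_alt notes last_beat bar_lines
instance (notes : List (Int × String)) (last_beat : Int) (bar_lines : List (Int × String)) (out : String) : Decidable (Spec_notes_to_dulcimer_tab notes last_beat bar_lines out) := by unfold Spec_notes_to_dulcimer_tab; infer_instance

-- ===== CLAIM (what is proved, stated in full; the proofs are below) =====
def Claim_equal_notes_to_dulcimer_tab : Prop := ∀ (notes : List (Int × String)) (last_beat : Int) (bar_lines : List (Int × String)), Dom_notes_to_dulcimer_tab notes last_beat bar_lines → Pre_notes_to_dulcimer_tab notes last_beat bar_lines → Spec_notes_to_dulcimer_tab notes last_beat bar_lines (notes_to_dulcimer_tab notes last_beat bar_lines)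

-- ===== LEMMAS AND PROOFS =====

-- both width computations yield the table's maximum value length, 10
set_option maxRecDepth 4096 in
lemma pvGetUnitWidth_eq : pvGetUnitWidth = 10 := by decide

lemma pvUnitWidthB_eq : pvUnitWidthB = 10 := by decide

-- the string A appends for one beat
def pvSeg (notes bar_lines : List (Int × String)) (beat : Int) : String :=
  match pvLookup notes beat with
  | some v => pvNoteToDulcTabString v 10
  | none =>
    if (pvLookup bar_lines beat).isSome then pvCharMul '|' 10 else pvCharMul '-' 10

lemma joinNil : ∀ (ls : List (List Char)), PySem.Chars.join [] ls = ls.flatten := by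
  intro ls
  induction ls with
  | nil => simp [PySem.Chars.join_nil]
  | cons p tl ih =>
    cases tl with
    | nil => simp [PySem.Chars.join_singleton]
    | cons q rest =>
      rw [PySem.Chars.join_cons_cons]
      simp only [List.flatten_cons] at ih ⊢
      rw [ih]; simp

lemma join_toList (l : List String) :
    (PySem.Str.join "" l).toList = (l.map String.toList).flatten := by
  rw [PySem.Str.toList_join]
  exact joinNil _

lemma foldl_append_toList (f : Int → String) :
    ∀ (l : List Int) (s : String),
      (l.foldl (fun tab b => tab ++ f b) s).toList
        = s.toList ++ (l.map (fun b => (f b).toList)).flatten := by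
  intro l
  induction l with
  | nil => intro s; simp
  | cons a tl ih => intro s; rw [List.foldl_cons, ih]; simp

-- the scatter loop preserves the table's length
lemma scatter_length (g : Int × String → String) (lb : Int) :
    ∀ (l : List (Int × String)) (segs : List String),
      (l.foldl (fun s kv => if 0 ≤ kv.1 ∧ kv.1 ≤ lb then s.set kv.1.toNat (g kv) else s) segs).length
        = segs.length := by
  intro l
  induction l with
  | nil => intro segs; rfl
  | cons kv tl ih =>
    intro segs
    rw [List.foldl_cons, ih]
    split <;> simp

-- what one scatter pass leaves at index i: the LAST write wins, i.e. the first match in l.reverse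
lemma scatter_get (g : Int × String → String) (lb : Int) :
    ∀ (l : List (Int × String)) (segs : List String) (i : Nat),
      i < segs.length → segs.length = (lb + 1).toNat →
      (l.foldl (fun s kv => if 0 ≤ kv.1 ∧ kv.1 ≤ lb then s.set kv.1.toNat (g kv) else s) segs)[i]?
        = (match l.reverse.find? (fun kv => kv.1 == (i : Int)) with
           | some kv => some (g kv)
           | none => segs[i]?) := by
  intro l
  induction l with
  | nil => intro segs i _ _; simp
  | cons kv tl ih =>
    intro segs i hi hlen
    rw [List.foldl_cons]
    have hstep_len : (if 0 ≤ kv.1 ∧ kv.1 ≤ lb then segs.set kv.1.toNat (g kv) else segs).length = segs.length := by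
      split <;> simp
    rw [ih _ i (by rw [hstep_len]; exact hi) (by rw [hstep_len]; exact hlen)]
    rw [List.reverse_cons, List.find?_append]
    cases hfind : tl.reverse.find? (fun kv => kv.1 == (i : Int)) with
    | some kv' => simp
    | none =>
      simp only [Option.none_or]
      by_cases hk : kv.1 = (i : Int)
      · have hrange : 0 ≤ kv.1 ∧ kv.1 ≤ lb := by
          constructor
          · omega
          · have : i < (lb + 1).toNat := by rw [← hlen]; exact hi
            omega
        have htonat : kv.1.toNat = i := by omega
        have hp : (kv.1 == (i : Int)) = true := by simp [hk]
        rw [if_pos hrange, htonat, List.getElem?_set_self hi]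
        simp [hp]
      · have hne : (kv.1 == (i : Int)) = false := by simp [hk]
        simp only [List.find?_cons, hne, List.find?_nil]
        split
        · next hr =>
          have : kv.1.toNat ≠ i := by omega
          rw [List.getElem?_set_ne this]
        · rfl

-- with pairwise-distinct keys, the first match in l.reverse is the first match in l
lemma find?_reverse_of_nodup (i : Int) :
    ∀ (l : List (Int × String)), (l.map Prod.fst).Nodup →
      l.reverse.find? (fun kv => kv.1 == i) = l.find? (fun kv => kv.1 == i) := by
  intro l
  induction l with
  | nil => intro _; rfl
  | cons kv tl ih =>
    intro hnd
    rw [List.map_cons, List.nodup_cons] at hnd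
    rw [List.reverse_cons, List.find?_append, ih hnd.2, List.find?_cons]
    cases hfind : tl.find? (fun kv => kv.1 == i) with
    | some kv' =>
      have hk' : kv'.1 = i := by simpa using List.find?_some hfind
      have hmem : kv'.1 ∈ tl.map Prod.fst := List.mem_map_of_mem (List.mem_of_find?_eq_some hfind)
      have : kv.1 ≠ i := by
        intro h; exact hnd.1 (by rw [h, ← hk'] at *; exact hmem)
      simp [List.find?_cons, this, hfind]
    | none =>
      simp [List.find?_cons, hfind]

-- ports as the join of the per-beat table
lemma A_eq (notes : List (Int × String)) (last_beat : Int) (bar_lines : List (Int × String)) :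
    notes_to_dulcimer_tab notes last_beat bar_lines
      = PySem.Str.join "" ((PySem.List.pyRange 0 (last_beat + 1) 1).map (pvSeg notes bar_lines)) := by
  apply String.toList_injective
  rw [join_toList]
  unfold notes_to_dulcimer_tab
  rw [pvGetUnitWidth_eq]
  have : (PySem.List.pyRange 0 (last_beat + 1) 1).foldl (fun tab beat =>
      match pvLookup notes beat with
      | some v => tab ++ pvNoteToDulcTabString v 10
      | none =>
        if (pvLookup bar_lines beat).isSome then tab ++ pvCharMul '|' 10
        else tab ++ pvCharMul '-' 10) ""
      = (PySem.List.pyRange 0 (last_beat + 1) 1).foldl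
          (fun tab beat => tab ++ pvSeg notes bar_lines beat) "" := by
    apply PySem.List.foldl_congr_mem
    intro acc x _
    unfold pvSeg
    cases pvLookup notes x with
    | some v => rfl
    | none => simp only; split <;> rfl
  rw [this, foldl_append_toList]
  simp [Function.comp_def]

lemma B_eq (notes : List (Int × String)) (last_beat : Int) (bar_lines : List (Int × String))
    (hnd : (notes.map Prod.fst).Nodup) :
    notes_to_dulcimer_tab_alt notes last_beat bar_lines
      = PySem.Str.join "" ((PySem.List.pyRange 0 (last_beat + 1) 1).map (pvSeg notes bar_lines)) := by
  have hB : notes_to_dulcimer_tab_alt notes last_beat bar_lines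
      = PySem.Str.join "" (notes.foldl (fun segs kv =>
          if 0 ≤ kv.1 ∧ kv.1 ≤ last_beat then segs.set kv.1.toNat (pvNoteToDulcTabString kv.2 pvUnitWidthB) else segs)
          (bar_lines.foldl (fun segs kv =>
            if 0 ≤ kv.1 ∧ kv.1 ≤ last_beat then segs.set kv.1.toNat (pvCharMul '|' pvUnitWidthB) else segs)
            (List.replicate (last_beat + 1).toNat (pvCharMul '-' pvUnitWidthB)))) := rfl
  rw [hB, pvUnitWidthB_eq]
  congr 1
  set segs0 : List String := List.replicate (last_beat + 1).toNat (pvCharMul '-' 10) with hsegs0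
  set segs1 := bar_lines.foldl (fun segs kv =>
    if 0 ≤ kv.1 ∧ kv.1 ≤ last_beat then segs.set kv.1.toNat (pvCharMul '|' 10) else segs) segs0 with hsegs1
  have hlen0 : segs0.length = (last_beat + 1).toNat := by simp [hsegs0]
  have hlen1 : segs1.length = (last_beat + 1).toNat := by
    rw [hsegs1, scatter_length]; exact hlen0
  have hlen2 : (notes.foldl (fun segs kv =>
      if 0 ≤ kv.1 ∧ kv.1 ≤ last_beat then segs.set kv.1.toNat (pvNoteToDulcTabString kv.2 10) else segs) segs1).length
      = (last_beat + 1).toNat := by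
    rw [scatter_length]; exact hlen1
  apply List.ext_getElem?
  intro i
  by_cases hi : i < (last_beat + 1).toNat
  · rw [scatter_get _ last_beat notes segs1 i (by rw [hlen1]; exact hi) hlen1]
    rw [List.getElem?_map, PySem.List.getElem?_pyRange_one]
    simp only [Int.sub_zero, hi, if_pos, Option.map_some, Int.zero_add]
    rw [find?_reverse_of_nodup _ notes hnd]
    cases hfind : notes.find? (fun kv => kv.1 == (i : Int)) with
    | some kv =>
      have hlk : pvLookup notes (i : Int) = some kv.2 := by unfold pvLookup; rw [hfind]; rfl
      simp [pvSeg, hlk]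
    | none =>
      have hlk : pvLookup notes (i : Int) = none := by unfold pvLookup; rw [hfind]; rfl
      rw [hsegs1, scatter_get _ last_beat bar_lines segs0 i (by rw [hlen0]; exact hi) hlen0]
      cases hfb : bar_lines.reverse.find? (fun kv => kv.1 == (i : Int)) with
      | some kv =>
        have hsome : (pvLookup bar_lines (i : Int)).isSome = true := by
          unfold pvLookup
          rw [Option.isSome_map, Option.isSome_iff_ne_none]
          intro hnone
          rw [List.find?_eq_none] at hnone
          have hpkv := List.find?_some hfb
          exact hnone kv (List.mem_reverse.mp (List.mem_of_find?_eq_some hfb)) hpkv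
        simp [pvSeg, hlk, hsome]
      | none =>
        have hnone : (pvLookup bar_lines (i : Int)).isSome = false := by
          unfold pvLookup
          rw [Option.isSome_map]
          have hfn : bar_lines.find? (fun kv => kv.1 == (i : Int)) = none := by
            rw [List.find?_eq_none] at hfb ⊢
            intro x hx; exact hfb x (List.mem_reverse.mpr hx)
          rw [hfn]; rfl
        rw [hsegs0, List.getElem?_replicate]
        simp [pvSeg, hlk, hnone, hi]
  · have h1 : (notes.foldl (fun segs kv =>
        if 0 ≤ kv.1 ∧ kv.1 ≤ last_beat then segs.set kv.1.toNat (pvNoteToDulcTabString kv.2 10) else segs) segs1)[i]? = none := by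
      apply List.getElem?_eq_none
      rw [hlen2]; omega
    have h2 : (((PySem.List.pyRange 0 (last_beat + 1) 1).map (pvSeg notes bar_lines)))[i]? = none := by
      apply List.getElem?_eq_none
      rw [List.length_map, PySem.List.length_pyRange_one]; omega
    rw [h1, h2]

-- ===== VERDICT (by name: the statement is the Claim_ definition above) =====
theorem notes_to_dulcimer_tab_spec : Claim_equal_notes_to_dulcimer_tab := by
  intro notes last_beat bar_lines _ hpre
  unfold Spec_notes_to_dulcimer_tab
  rw [A_eq, B_eq _ _ _ hpre]
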